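-- pv_equiv track=rewrite | github.com/thomascassidyzm/ssi-dashboard-v7 | phase5_batch1_s0101_s0300/scripts/generate_agent_11_baskets.py | count_distribution
-- ===== SOURCE A (Python) =====
-- from typing import List, Dict, Set, Tuple, Optional
--
-- def count_distribution(phrases: List[List]) -> Dict:
--     """Count the distribution of phrase lengths"""
--     dist = {
--         "really_short_1_2": 0,
--         "quite_short_3": 0,
--         "longer_4_5": 0,
--         "long_6_plus": 0
--     }
--
--     for phrase in phrases:
--         count = phrase[3]
--         if count <= 2:
--             dist["really_short_1_2"] += 1
--         elif count == 3:
--             dist["quite_short_3"] += 1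
--         elif count <= 5:
--             dist["longer_4_5"] += 1
--         else:
--             dist["long_6_plus"] += 1
--
--     return dist
-- ===== SOURCE B (Python) =====
-- from typing import List, Dict
--
-- def count_distribution(phrases: List[List]) -> Dict:
--     """Count the distribution of phrase lengths (four independent filtering passes)."""
--     return {
--         "really_short_1_2": sum(1 for p in phrases if p[3] <= 2),
--         "quite_short_3": sum(1 for p in phrases if p[3] == 3),
--         "longer_4_5": sum(1 for p in phrases if 4 <= p[3] <= 5),
--         "long_6_plus": sum(1 for p in phrases if p[3] >= 6),
--     }
-- ===== Notes on version B (the rewrite author's own statement) =====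
-- stated objective: alternative
-- what changed: Replaces the single classifying loop with an if/elif chain updating a mutable dict by four independent filtering passes, one per bucket, assembled directly into the result dict.
import Mathlib
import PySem

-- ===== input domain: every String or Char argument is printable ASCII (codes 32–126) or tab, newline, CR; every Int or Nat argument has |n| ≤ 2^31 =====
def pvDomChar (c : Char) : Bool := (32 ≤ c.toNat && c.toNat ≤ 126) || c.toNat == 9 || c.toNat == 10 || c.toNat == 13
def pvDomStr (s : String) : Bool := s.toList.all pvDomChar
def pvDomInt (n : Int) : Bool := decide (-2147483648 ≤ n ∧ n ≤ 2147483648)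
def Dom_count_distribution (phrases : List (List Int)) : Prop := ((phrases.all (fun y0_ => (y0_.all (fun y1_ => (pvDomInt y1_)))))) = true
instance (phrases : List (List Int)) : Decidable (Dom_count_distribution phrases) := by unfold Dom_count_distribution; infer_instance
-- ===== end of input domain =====

-- B replaces A's single classifying loop over a mutable dict with four independent
-- counting passes, one per bucket (alternative decomposition, same O(n) cost).


-- ===== PORT A =====
-- A's loop: look up phrase[3] and bump the matching bucket of the mutable dict.
-- (phrase[3] raises IndexError for phrases shorter than 4; Pre_ excludes those,
--  so the .getD 0 default is never reached on admitted inputs.)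
def count_distribution (phrases : List (List Int)) : List (String × Int) :=
  let dist : PySem.Dict String Int :=
    ((((PySem.Dict.empty).insert "really_short_1_2" 0).insert "quite_short_3" 0).insert
      "longer_4_5" 0).insert "long_6_plus" 0
  let dist := phrases.foldl (fun d phrase =>
    let count := (PySem.List.pyGet? phrase 3).getD 0
    if count ≤ 2 then d.modify "really_short_1_2" 0 (· + 1)
    else if count = 3 then d.modify "quite_short_3" 0 (· + 1)
    else if count ≤ 5 then d.modify "longer_4_5" 0 (· + 1)
    else d.modify "long_6_plus" 0 (· + 1)) dist
  dist.items

-- ===== PORT B =====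
-- B: one independent counting pass per bucket (sum(1 for p in phrases if …) = countP).
def count_distribution_alt (phrases : List (List Int)) : List (String × Int) :=
  [("really_short_1_2", (phrases.countP (fun p => (PySem.List.pyGet? p 3).getD 0 ≤ 2) : Int)),
   ("quite_short_3", (phrases.countP (fun p => (PySem.List.pyGet? p 3).getD 0 = 3) : Int)),
   ("longer_4_5", (phrases.countP (fun p => 4 ≤ (PySem.List.pyGet? p 3).getD 0 ∧ (PySem.List.pyGet? p 3).getD 0 ≤ 5) : Int)),
   ("long_6_plus", (phrases.countP (fun p => 6 ≤ (PySem.List.pyGet? p 3).getD 0) : Int))]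

-- ===== PRECONDITION & SPEC =====
-- Pre_ excludes exactly the inputs where Python A raises IndexError on phrase[3]
-- (a phrase with fewer than 4 elements); B raises there too.
def Pre_count_distribution (phrases : List (List Int)) : Prop :=
  ∀ p ∈ phrases, 4 ≤ p.length
instance (phrases : List (List Int)) : Decidable (Pre_count_distribution phrases) := by unfold Pre_count_distribution; infer_instance
def pvWitness_count_distribution : List (List Int) := [[1, 2, 3, 4], [0, 0, 0, 7, 9]]

def Spec_count_distribution (phrases : List (List Int)) (out : List (String × Int)) : Prop := out = count_distribution_alt phrases
instance (phrases : List (List Int)) (out : List (String × Int)) : Decidable (Spec_count_distribution phrases out) := by unfold Spec_count_distribution; infer_instance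

-- ===== CLAIM (what is proved, stated in full; the proofs are below) =====
def Claim_equal_count_distribution : Prop := ∀ (phrases : List (List Int)), Dom_count_distribution phrases → Pre_count_distribution phrases → Spec_count_distribution phrases (count_distribution phrases)

-- ===== LEMMAS AND PROOFS =====

-- A's fold over the 4-key literal dict, from arbitrary counter values.
theorem foldA_items (phrases : List (List Int)) (a b c d : Int) :
    (phrases.foldl (fun d phrase =>
        let count := (PySem.List.pyGet? phrase 3).getD 0
        if count ≤ 2 then d.modify "really_short_1_2" 0 (· + 1)
        else if count = 3 then d.modify "quite_short_3" 0 (· + 1)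
        else if count ≤ 5 then d.modify "longer_4_5" 0 (· + 1)
        else d.modify "long_6_plus" 0 (· + 1))
      (PySem.Dict.mk [("really_short_1_2", a), ("quite_short_3", b),
                      ("longer_4_5", c), ("long_6_plus", d)])).items =
    [("really_short_1_2", a + (phrases.countP (fun p => (PySem.List.pyGet? p 3).getD 0 ≤ 2) : Int)),
     ("quite_short_3", b + (phrases.countP (fun p => (PySem.List.pyGet? p 3).getD 0 = 3) : Int)),
     ("longer_4_5", c + (phrases.countP (fun p => 4 ≤ (PySem.List.pyGet? p 3).getD 0 ∧ (PySem.List.pyGet? p 3).getD 0 ≤ 5) : Int)),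
     ("long_6_plus", d + (phrases.countP (fun p => 6 ≤ (PySem.List.pyGet? p 3).getD 0) : Int))] := by
  induction phrases generalizing a b c d with
  | nil => simp
  | cons p rest ih =>
    simp only [List.foldl_cons]
    set n := (PySem.List.pyGet? p 3).getD 0 with hn
    by_cases h1 : n ≤ 2
    · simp only [if_pos h1]
      rw [show (PySem.Dict.mk [("really_short_1_2", a), ("quite_short_3", b),
            ("longer_4_5", c), ("long_6_plus", d)]).modify "really_short_1_2" 0 (· + 1) =
          PySem.Dict.mk [("really_short_1_2", a + 1), ("quite_short_3", b),
            ("longer_4_5", c), ("long_6_plus", d)] from by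
        simp [PySem.Dict.modify, PySem.Dict.getD, PySem.Dict.get?, PySem.Dict.insert]]
      rw [ih]
      have hc1 : ((PySem.List.pyGet? p 3).getD 0 ≤ 2) = True := by simp [← hn, h1]
      have hc2 : ((PySem.List.pyGet? p 3).getD 0 = 3) = False := by simp [← hn]; omega
      have hc3 : (4 ≤ (PySem.List.pyGet? p 3).getD 0 ∧ (PySem.List.pyGet? p 3).getD 0 ≤ 5) = False := by
        simp [← hn]; omega
      have hc4 : (6 ≤ (PySem.List.pyGet? p 3).getD 0) = False := by simp [← hn]; omega
      simp [hc1, hc2, hc3, hc4]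
      omega
    · by_cases h2 : n = 3
      · simp only [if_neg h1, if_pos h2]
        rw [show (PySem.Dict.mk [("really_short_1_2", a), ("quite_short_3", b),
              ("longer_4_5", c), ("long_6_plus", d)]).modify "quite_short_3" 0 (· + 1) =
            PySem.Dict.mk [("really_short_1_2", a), ("quite_short_3", b + 1),
              ("longer_4_5", c), ("long_6_plus", d)] from by
          simp [PySem.Dict.modify, PySem.Dict.getD, PySem.Dict.get?, PySem.Dict.insert]]
        rw [ih]
        have hc1 : ((PySem.List.pyGet? p 3).getD 0 ≤ 2) = False := by simp [← hn]; omega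
        have hc2 : ((PySem.List.pyGet? p 3).getD 0 = 3) = True := by simp [← hn, h2]
        have hc3 : (4 ≤ (PySem.List.pyGet? p 3).getD 0 ∧ (PySem.List.pyGet? p 3).getD 0 ≤ 5) = False := by
          simp [← hn]; omega
        have hc4 : (6 ≤ (PySem.List.pyGet? p 3).getD 0) = False := by simp [← hn]; omega
        simp [hc1, hc2, hc3, hc4]
        omega
      · by_cases h3 : n ≤ 5
        · simp only [if_neg h1, if_neg h2, if_pos h3]
          rw [show (PySem.Dict.mk [("really_short_1_2", a), ("quite_short_3", b),
                ("longer_4_5", c), ("long_6_plus", d)]).modify "longer_4_5" 0 (· + 1) =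
              PySem.Dict.mk [("really_short_1_2", a), ("quite_short_3", b),
                ("longer_4_5", c + 1), ("long_6_plus", d)] from by
            simp [PySem.Dict.modify, PySem.Dict.getD, PySem.Dict.get?, PySem.Dict.insert]]
          rw [ih]
          have hc1 : ((PySem.List.pyGet? p 3).getD 0 ≤ 2) = False := by simp [← hn]; omega
          have hc2 : ((PySem.List.pyGet? p 3).getD 0 = 3) = False := by simp [← hn]; omega
          have hc3 : (4 ≤ (PySem.List.pyGet? p 3).getD 0 ∧ (PySem.List.pyGet? p 3).getD 0 ≤ 5) = True := by
            simp [← hn]; omega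
          have hc4 : (6 ≤ (PySem.List.pyGet? p 3).getD 0) = False := by simp [← hn]; omega
          simp [hc1, hc2, hc3, hc4]
          omega
        · simp only [if_neg h1, if_neg h2, if_neg h3]
          rw [show (PySem.Dict.mk [("really_short_1_2", a), ("quite_short_3", b),
                ("longer_4_5", c), ("long_6_plus", d)]).modify "long_6_plus" 0 (· + 1) =
              PySem.Dict.mk [("really_short_1_2", a), ("quite_short_3", b),
                ("longer_4_5", c), ("long_6_plus", d + 1)] from by
            simp [PySem.Dict.modify, PySem.Dict.getD, PySem.Dict.get?, PySem.Dict.insert]]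
          rw [ih]
          have hc1 : ((PySem.List.pyGet? p 3).getD 0 ≤ 2) = False := by simp [← hn]; omega
          have hc2 : ((PySem.List.pyGet? p 3).getD 0 = 3) = False := by simp [← hn]; omega
          have hc3 : (4 ≤ (PySem.List.pyGet? p 3).getD 0 ∧ (PySem.List.pyGet? p 3).getD 0 ≤ 5) = False := by
            simp [← hn]; omega
          have hc4 : (6 ≤ (PySem.List.pyGet? p 3).getD 0) = True := by simp [← hn]; omega
          simp [hc1, hc2, hc3, hc4]
          omega

-- ===== VERDICT (by name: the statement is the Claim_ definition above) =====
theorem count_distribution_spec : Claim_equal_count_distribution := by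
  intro phrases _ _
  show count_distribution phrases = count_distribution_alt phrases
  unfold count_distribution count_distribution_alt
  have hinit : ((((PySem.Dict.empty).insert "really_short_1_2" (0 : Int)).insert "quite_short_3" 0).insert
      "longer_4_5" 0).insert "long_6_plus" 0 =
      PySem.Dict.mk [("really_short_1_2", 0), ("quite_short_3", 0),
                     ("longer_4_5", 0), ("long_6_plus", 0)] := by decide
  simp only [hinit, foldA_items, zero_add]
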